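-- pv_equiv track=rewrite | github.com/darkblock9/CalculusAndMathFunctions | matrices_and_vectors.py | ehTriangular
-- ===== SOURCE A (Python) =====
-- def ehMatriz(A):
--     # Verifica se uma lista de listas dada é uma matriz ou
--     # não.
--     ehM = True
--     # Guarda o número m de linhas e n de colunas
--     m = len(A)
--     n = len(A[0])
--     # Se a matriz for uma matriz-linha, len(A) == 1 e o
--     # programa acaba por aqui.
--     if m == 1:
--         return ehM
--     # Passeia por cada lista (exceto a primeira), e, a cada
--     # lista por que passa, verifica se o número de elementos
--     # é igual ao da primeira lista (A[0]) e, se algum for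
--     # diferente, muda ehM para False.
--     else:
--         for i in range(1,m):
--             if len(A[i]) != n:
--                 ehM = False
--     return ehM
--
-- def ehQuadrada(A):
--     ehQ = False
--     m = len(A)
--     n = len(A[0])
--     if ehMatriz(A) and m==n:
--         ehQ = True
--     return ehQ
--
-- def ehTriangular(A):
--     if ehQuadrada(A):
--         n = len(A)
--         boole1 = True
--         boole2 = True
--         for i in range(1,n):
--             for j in range(0,i):
--                 if A[i][j] != 0:
--                     boole1 = False
--         for i in range(0,n-1):
--             for j in range(i+1,n):
--                 if A[i][j] != 0:
--                     boole2 = False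
--         return boole1 or boole2
-- ===== SOURCE B (Python) =====
-- def ehTriangular(A):
--     n = len(A)
--     if any(len(row) != n for row in A):
--         return None
--     upper = True   # no nonzero strictly below the diagonal
--     lower = True   # no nonzero strictly above the diagonal
--     M = A
--     while M:
--         head, rest = M[0], M[1:]
--         if any(row[0] != 0 for row in rest):
--             upper = False
--         if any(x != 0 for x in head[1:]):
--             lower = False
--         M = [row[1:] for row in rest]
--     return upper or lower
-- ===== Notes on version B (the rewrite author's own statement) =====
-- stated objective: alternative
-- what changed: Instead of two index-bounded nested scans over a fixed matrix, B repeatedly peels the leading row and column off successively smaller minors, checking at each step that the exposed first column (below-diagonal) and first-row tail (above-diagonal) are zero.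
import Mathlib
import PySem

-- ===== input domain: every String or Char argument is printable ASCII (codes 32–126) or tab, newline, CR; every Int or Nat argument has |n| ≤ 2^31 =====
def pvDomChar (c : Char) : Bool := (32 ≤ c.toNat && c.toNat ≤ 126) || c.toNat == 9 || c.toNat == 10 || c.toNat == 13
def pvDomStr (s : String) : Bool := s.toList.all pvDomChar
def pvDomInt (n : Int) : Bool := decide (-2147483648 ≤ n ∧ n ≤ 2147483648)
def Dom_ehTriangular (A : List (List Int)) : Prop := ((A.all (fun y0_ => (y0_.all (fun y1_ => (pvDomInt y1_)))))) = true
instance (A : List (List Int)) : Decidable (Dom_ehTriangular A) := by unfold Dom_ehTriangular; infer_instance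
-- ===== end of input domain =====

-- B replaces A's two index-bounded nested scans by iterative peeling of the leading row/column
-- off successively smaller minors, maintaining two flags (objective: alternative decomposition).

-- ===== PORT A =====
def pyEhMatriz (A : List (List Int)) : Bool :=
  let m : Int := A.length
  let n : Int := (PySem.List.pyGetD A 0 []).length
  if m = 1 then true
  else
    (PySem.List.pyRange 1 m 1).foldl
      (fun ehM i => if ((PySem.List.pyGetD A i []).length : Int) ≠ n then false else ehM) true

def pyEhQuadrada (A : List (List Int)) : Bool :=
  let m : Int := A.length
  let n : Int := (PySem.List.pyGetD A 0 []).length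
  if pyEhMatriz A ∧ m = n then true else false

def ehTriangular (A : List (List Int)) : Option Bool :=
  if pyEhQuadrada A then
    let n : Int := A.length
    let boole1 :=
      (PySem.List.pyRange 1 n 1).foldl (fun b1 i =>
        (PySem.List.pyRange 0 i 1).foldl (fun b j =>
          if PySem.List.pyGetD (PySem.List.pyGetD A i []) j 0 ≠ 0 then false else b) b1) true
    let boole2 :=
      (PySem.List.pyRange 0 (n - 1) 1).foldl (fun b2 i =>
        (PySem.List.pyRange (i + 1) n 1).foldl (fun b j =>
          if PySem.List.pyGetD (PySem.List.pyGetD A i []) j 0 ≠ 0 then false else b) b2) true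
    some (boole1 || boole2)
  else none

-- ===== PORT B =====
-- the while-loop: state (upper, lower), M shrinks to its minor each step.  The fuel argument
-- (initialised to M.length, decreasing by exactly one row per iteration) only makes the
-- recursion structural; the fuel-exhausted branch is unreachable.
-- row[0] is ported as pyGetD row 0 0; on the inputs the loop reaches (square matrices)
-- every row of `rest` is nonempty, so the default is never used.  row[1:] = List.drop 1 (exact).
def peelGo : Nat → List (List Int) → Bool → Bool → Bool × Bool
  | _, [], u, l => (u, l)
  | 0, _ :: _, u, l => (u, l)
  | (f + 1), head :: rest, u, l =>
      peelGo f (rest.map (fun row => row.drop 1))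
        (if rest.any (fun row => PySem.List.pyGetD row 0 0 ≠ 0) then false else u)
        (if (head.drop 1).any (fun x => x ≠ 0) then false else l)

def peel (M : List (List Int)) (u l : Bool) : Bool × Bool := peelGo M.length M u l

def ehTriangular_alt (A : List (List Int)) : Option Bool :=
  let n := A.length
  if A.any (fun row => row.length ≠ n) then none
  else
    let p := peel A true true
    some (p.1 || p.2)

-- ===== PRECONDITION & SPEC =====
-- Pre_ excludes only the empty list, on which A raises IndexError (len(A[0])).
def Pre_ehTriangular (A : List (List Int)) : Prop := A ≠ []
instance (A : List (List Int)) : Decidable (Pre_ehTriangular A) := by unfold Pre_ehTriangular; infer_instance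
def pvWitness_ehTriangular : List (List Int) := [[1]]

def Spec_ehTriangular (A : List (List Int)) (out : Option Bool) : Prop := out = ehTriangular_alt A
instance (A : List (List Int)) (out : Option Bool) : Decidable (Spec_ehTriangular A out) := by unfold Spec_ehTriangular; infer_instance

-- ===== CLAIM (what is proved, stated in full; the proofs are below) =====
def Claim_equal_ehTriangular : Prop := ∀ (A : List (List Int)), Dom_ehTriangular A → Pre_ehTriangular A → Spec_ehTriangular A (ehTriangular A)

-- ===== LEMMAS AND PROOFS =====

-- total entry access: out-of-range entries read as 0
def entry (M : List (List Int)) (i j : Nat) : Int := ((M[i]?.getD [])[j]?.getD 0)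

-- "no nonzero strictly below / above the diagonal"
def BelowP (M : List (List Int)) : Prop := ∀ (i j : Nat), j < i → entry M i j = 0
def AboveP (M : List (List Int)) : Prop := ∀ (i j : Nat), i < j → entry M i j = 0

theorem pyGetD0 (row : List Int) : PySem.List.pyGetD row 0 0 = row[0]?.getD 0 := by
  cases row <;> simp [PySem.List.pyGetD, PySem.List.pyIdx?, PySem.List.pyGet?]

theorem entry_nil (i j : Nat) : entry [] i j = 0 := by simp [entry]

theorem entry_cons_succ (head : List Int) (rest : List (List Int)) (i j : Nat) :
    entry (head :: rest) (i + 1) j = entry rest i j := by simp [entry]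

theorem entry_cons_zero (head : List Int) (rest : List (List Int)) (j : Nat) :
    entry (head :: rest) 0 j = head[j]?.getD 0 := by simp [entry]

theorem entry_minor (rest : List (List Int)) (i j : Nat) :
    entry (rest.map (fun row => row.drop 1)) i j = entry rest i (1 + j) := by
  simp only [entry, List.getElem?_map]
  cases h : rest[i]? with
  | none => simp
  | some r => simp [Nat.add_comm 1 j]

theorem entry_in (M : List (List Int)) (i j : Nat) (hi : i < M.length)
    (hj : j < (M[i]).length) : entry M i j = M[i][j] := by
  unfold entry
  rw [List.getElem?_eq_getElem hi]
  simp only [Option.getD_some]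
  rw [List.getElem?_eq_getElem hj]
  simp

theorem entry_len_le (M : List (List Int)) (i j : Nat) (h : M.length ≤ i) :
    entry M i j = 0 := by
  simp [entry, List.getElem?_eq_none h]

theorem entry_row_le (M : List (List Int)) (i j : Nat) (hi : i < M.length)
    (h : (M[i]).length ≤ j) : entry M i j = 0 := by
  unfold entry
  rw [List.getElem?_eq_getElem hi]
  simp only [Option.getD_some]
  rw [List.getElem?_eq_none h]
  simp

theorem col_iff (rest : List (List Int)) :
    (rest.any fun row => PySem.List.pyGetD row 0 0 ≠ 0) = false ↔
      ∀ k : Nat, entry rest k 0 = 0 := by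
  rw [List.any_eq_false]
  constructor
  · intro h k
    cases hk : rest[k]? with
    | none => simp [entry, hk]
    | some r =>
      have hm := List.mem_of_getElem? hk
      have := h r hm
      simp only [decide_eq_true_eq, not_not] at this
      rw [pyGetD0] at this
      simp [entry, hk, this]
  · intro h row hrow
    obtain ⟨k, hk⟩ := List.mem_iff_getElem?.mp hrow
    have := h k
    simp only [entry, hk, Option.getD_some] at this
    simp [pyGetD0, this]

theorem row_iff (head : List Int) :
    ((head.drop 1).any fun x => x ≠ 0) = false ↔
      ∀ j : Nat, 0 < j → head[j]?.getD 0 = 0 := by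
  rw [List.any_eq_false]
  constructor
  · intro h j hj
    cases hk : head[j]? with
    | none => simp
    | some x =>
      have hd : (head.drop 1)[j - 1]? = some x := by
        rw [List.getElem?_drop]
        have : 1 + (j - 1) = j := by omega
        rw [this, hk]
      have := h x (List.mem_of_getElem? hd)
      simp only [decide_eq_true_eq, not_not] at this
      simp [this]
  · intro h x hx
    obtain ⟨m, hm⟩ := List.mem_iff_getElem?.mp hx
    rw [List.getElem?_drop] at hm
    have := h (1 + m) (by omega)
    rw [hm] at this
    simpa using this

theorem BelowP_cons (head : List Int) (rest : List (List Int)) :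
    BelowP (head :: rest) ↔
      (∀ k : Nat, entry rest k 0 = 0) ∧ BelowP (rest.map (fun row => row.drop 1)) := by
  constructor
  · intro h
    refine ⟨fun k => ?_, fun i j hji => ?_⟩
    · have := h (k + 1) 0 (by omega)
      rwa [entry_cons_succ] at this
    · rw [entry_minor]
      have := h (i + 1) (1 + j) (by omega)
      rwa [entry_cons_succ] at this
  · rintro ⟨hcol, hmin⟩ i j hji
    match i, hji with
    | (k + 1), _ =>
      rw [entry_cons_succ]
      match j with
      | 0 => exact hcol k
      | (j' + 1) =>
        have := hmin k j' (by omega)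
        rw [entry_minor] at this
        have heq : 1 + j' = j' + 1 := by omega
        rwa [heq] at this

theorem AboveP_cons (head : List Int) (rest : List (List Int)) :
    AboveP (head :: rest) ↔
      (∀ j : Nat, 0 < j → head[j]?.getD 0 = 0) ∧ AboveP (rest.map (fun row => row.drop 1)) := by
  constructor
  · intro h
    refine ⟨fun j hj => ?_, fun i j hij => ?_⟩
    · have := h 0 j hj
      rwa [entry_cons_zero] at this
    · rw [entry_minor]
      have := h (i + 1) (1 + j) (by omega)
      rwa [entry_cons_succ] at this
  · rintro ⟨hrow, hmin⟩ i j hij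
    match i with
    | 0 =>
      rw [entry_cons_zero]
      exact hrow j hij
    | (k + 1) =>
      rw [entry_cons_succ]
      match j, hij with
      | (j' + 1), _ =>
        have := hmin k j' (by omega)
        rw [entry_minor] at this
        have heq : 1 + j' = j' + 1 := by omega
        rwa [heq] at this

theorem BelowP_nil : BelowP [] := fun i j _ => entry_nil i j
theorem AboveP_nil : AboveP [] := fun i j _ => entry_nil i j

theorem peelGo_iff : ∀ (f : Nat) (M : List (List Int)) (u l : Bool), M.length ≤ f →
    ((peelGo f M u l).1 = true ↔ (u = true ∧ BelowP M)) ∧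
    ((peelGo f M u l).2 = true ↔ (l = true ∧ AboveP M)) := by
  intro f
  induction f with
  | zero =>
    intro M u l hf
    have : M = [] := by cases M with
      | nil => rfl
      | cons a t => simp at hf
    subst this
    simp [peelGo, BelowP_nil, AboveP_nil]
  | succ f ih =>
    intro M u l hf
    cases M with
    | nil => simp [peelGo, BelowP_nil, AboveP_nil]
    | cons head rest =>
      rw [show peelGo (f + 1) (head :: rest) u l
            = peelGo f (rest.map (fun row => row.drop 1))
                (if rest.any (fun row => PySem.List.pyGetD row 0 0 ≠ 0) then false else u)
                (if (head.drop 1).any (fun x => x ≠ 0) then false else l) from rfl]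
      have hlen : (rest.map (fun row => row.drop 1)).length ≤ f := by
        simp at hf ⊢; omega
      have hih := ih (rest.map (fun row => row.drop 1))
          (if rest.any (fun row => PySem.List.pyGetD row 0 0 ≠ 0) then false else u)
          (if (head.drop 1).any (fun x => x ≠ 0) then false else l) hlen
      constructor
      · rw [hih.1, BelowP_cons]
        by_cases hc : (rest.any fun row => PySem.List.pyGetD row 0 0 ≠ 0) = true
        · rw [if_pos hc]
          have hnall : ¬ ∀ k : Nat, entry rest k 0 = 0 := by
            intro hall
            rw [← col_iff] at hall
            rw [hall] at hc
            exact Bool.false_ne_true hc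
          constructor
          · intro h1
            exact absurd h1.1 (by simp)
          · rintro ⟨_, hall, _⟩
            exact absurd hall hnall
        · rw [if_neg hc]
          have hfalse : (rest.any fun row => PySem.List.pyGetD row 0 0 ≠ 0) = false := by
            revert hc; cases (rest.any fun row => PySem.List.pyGetD row 0 0 ≠ 0) <;> simp
          have hall := (col_iff rest).mp hfalse
          constructor
          · rintro ⟨h1, h2⟩
            exact ⟨h1, hall, h2⟩
          · rintro ⟨h1, _, h2⟩
            exact ⟨h1, h2⟩
      · rw [hih.2, AboveP_cons]
        by_cases hc : ((head.drop 1).any fun x => x ≠ 0) = true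
        · rw [if_pos hc]
          have hnall : ¬ ∀ j : Nat, 0 < j → head[j]?.getD 0 = 0 := by
            intro hall
            rw [← row_iff] at hall
            rw [hall] at hc
            exact Bool.false_ne_true hc
          constructor
          · intro h1
            exact absurd h1.1 (by simp)
          · rintro ⟨_, hall, _⟩
            exact absurd hall hnall
        · rw [if_neg hc]
          have hfalse : ((head.drop 1).any fun x => x ≠ 0) = false := by
            revert hc; cases ((head.drop 1).any fun x => x ≠ 0) <;> simp
          have hall := (row_iff head).mp hfalse
          constructor
          · rintro ⟨h1, h2⟩
            exact ⟨h1, hall, h2⟩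
          · rintro ⟨h1, _, h2⟩
            exact ⟨h1, h2⟩

theorem peel_iff (M : List (List Int)) (u l : Bool) :
    ((peel M u l).1 = true ↔ (u = true ∧ BelowP M)) ∧
    ((peel M u l).2 = true ↔ (l = true ∧ AboveP M)) :=
  peelGo_iff M.length M u l (le_refl _)

theorem foldl_ite_false {α : Type} (p : α → Prop) [DecidablePred p] :
    ∀ (l : List α) (init : Bool),
      l.foldl (fun b x => if p x then false else b) init
        = (init && l.all (fun x => decide ¬ p x)) := by
  intro l
  induction l with
  | nil => simp
  | cons x l ih =>
    intro init
    simp only [List.foldl_cons, List.all_cons, ih]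
    by_cases h : p x <;> simp [h]

theorem foldl_and {α : Type} (q : α → Bool) :
    ∀ (l : List α) (init : Bool),
      l.foldl (fun b x => b && q x) init = (init && l.all q) := by
  intro l
  induction l with
  | nil => simp
  | cons x l ih =>
    intro init
    simp [List.foldl_cons, ih, Bool.and_assoc]

theorem pyGetD_at {α : Type} (A : List α) (d : α) (i : Int) (h0 : 0 ≤ i) (hlt : i < (A.length : Int)) :
    PySem.List.pyGetD A i d = A[i.toNat]'(by omega) :=
  PySem.List.pyGetD_eq_getElem A d h0 hlt

theorem matriz_char (A : List (List Int)) :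
    pyEhMatriz A = true ↔
      ∀ i : Int, 1 ≤ i → i < (A.length : Int) →
        ((PySem.List.pyGetD A i []).length : Int) = ((PySem.List.pyGetD A 0 []).length : Int) := by
  simp only [pyEhMatriz]
  by_cases h1 : (A.length : Int) = 1
  · simp only [h1, if_true]
    constructor
    · intro _ i hi hilt; omega
    · intro _; exact trivial
  · rw [if_neg h1, foldl_ite_false]
    simp only [Bool.true_and, List.all_eq_true, PySem.List.mem_pyRange_one, decide_eq_true_eq,
      not_not, and_imp]

theorem sq_iff (A : List (List Int)) (hA : A ≠ []) :
    pyEhQuadrada A = true ↔ (A.any fun row => row.length ≠ A.length) = false := by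
  have hlen : 0 < A.length := List.length_pos_iff.mpr hA
  have h0 : PySem.List.pyGetD A (0 : Int) [] = A[0] := by
    rw [pyGetD_at A [] 0 (by omega) (by exact_mod_cast hlen)]; simp
  simp only [pyEhQuadrada, List.any_eq_false]
  have hstep : (if pyEhMatriz A = true ∧ (A.length : Int) = ((PySem.List.pyGetD A 0 []).length : Int) then true else false) = true
      ↔ (pyEhMatriz A = true ∧ (A.length : Int) = ((PySem.List.pyGetD A 0 []).length : Int)) := by
    split_ifs with h
    · simp [h]
    · simp only [false_iff]; exact h
  rw [hstep, matriz_char]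
  simp only [h0, decide_eq_true_eq, not_not]
  constructor
  · rintro ⟨hall, hmn⟩ row hrow
    obtain ⟨k, hk, rfl⟩ := List.mem_iff_getElem.mp hrow
    rcases Nat.eq_zero_or_pos k with hk0 | hkpos
    · subst hk0; omega
    · have := hall (k : Int) (by exact_mod_cast hkpos) (by exact_mod_cast hk)
      rw [pyGetD_at A [] (k : Int) (by omega) (by exact_mod_cast hk)] at this
      simp only [Int.toNat_natCast] at this
      omega
  · intro h
    have hmn : (A.length : Int) = (A[0].length : Int) := by
      have := h A[0] (List.getElem_mem hlen)
      omega
    refine ⟨?_, hmn⟩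
    intro i hi hilt
    rw [pyGetD_at A [] i (by omega) hilt]
    have := h (A[i.toNat]'(by omega)) (List.getElem_mem (by omega))
    omega

theorem b1_iff (A : List (List Int)) (hsq : ∀ row ∈ A, row.length = A.length) :
    ((PySem.List.pyRange 1 (A.length : Int) 1).foldl (fun b1 i =>
        (PySem.List.pyRange 0 i 1).foldl (fun b j =>
          if PySem.List.pyGetD (PySem.List.pyGetD A i []) j 0 ≠ 0 then false else b) b1) true)
        = true ↔ BelowP A := by
  simp only [foldl_ite_false, foldl_and]
  simp only [List.all_eq_true, PySem.List.mem_pyRange_one, decide_eq_true_eq, not_not,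
    Bool.true_and, and_imp, BelowP]
  constructor
  · intro h i j hji
    by_cases hi : i < A.length
    · by_cases hj : j < (A[i]).length
      · rw [entry_in A i j hi hj]
        have h2 := h (i : Int) (by omega) (by exact_mod_cast hi) (j : Int) (by omega) (by omega)
        rw [pyGetD_at A [] (i : Int) (by omega) (by exact_mod_cast hi)] at h2
        rw [pyGetD_at _ 0 (j : Int) (by omega) (by simp only [Int.toNat_natCast]; exact_mod_cast hj)] at h2
        simpa using h2
      · exact entry_row_le A i j hi (by omega)
    · exact entry_len_le A i j (by omega)
  · intro h i hi hilt j hj0 hji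
    rw [pyGetD_at A [] i (by omega) hilt]
    rw [pyGetD_at _ 0 j (by omega) (by rw [hsq _ (List.getElem_mem (by omega))]; omega)]
    rw [← entry_in A i.toNat j.toNat (by omega) (by rw [hsq _ (List.getElem_mem (by omega))]; omega)]
    exact h i.toNat j.toNat (by omega)

theorem b2_iff (A : List (List Int)) (hsq : ∀ row ∈ A, row.length = A.length) :
    ((PySem.List.pyRange 0 ((A.length : Int) - 1) 1).foldl (fun b2 i =>
        (PySem.List.pyRange (i + 1) (A.length : Int) 1).foldl (fun b j =>
          if PySem.List.pyGetD (PySem.List.pyGetD A i []) j 0 ≠ 0 then false else b) b2) true)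
        = true ↔ AboveP A := by
  simp only [foldl_ite_false, foldl_and]
  simp only [List.all_eq_true, PySem.List.mem_pyRange_one, decide_eq_true_eq, not_not,
    Bool.true_and, and_imp, AboveP]
  constructor
  · intro h i j hij
    by_cases hi : i < A.length
    · by_cases hj : j < (A[i]).length
      · rw [entry_in A i j hi hj]
        have hjA : j < A.length := by rw [hsq _ (List.getElem_mem hi)] at hj; omega
        have h2 := h (i : Int) (by omega) (by omega) (j : Int) (by omega) (by exact_mod_cast hjA)
        rw [pyGetD_at A [] (i : Int) (by omega) (by exact_mod_cast hi)] at h2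
        rw [pyGetD_at _ 0 (j : Int) (by omega) (by simp only [Int.toNat_natCast]; exact_mod_cast hj)] at h2
        simpa using h2
      · exact entry_row_le A i j hi (by omega)
    · exact entry_len_le A i j (by omega)
  · intro h i hi hilt j hj0 hji
    rw [pyGetD_at A [] i (by omega) (by omega)]
    rw [pyGetD_at _ 0 j (by omega) (by rw [hsq _ (List.getElem_mem (by omega))]; omega)]
    rw [← entry_in A i.toNat j.toNat (by omega) (by rw [hsq _ (List.getElem_mem (by omega))]; omega)]
    exact h i.toNat j.toNat (by omega)

theorem main_eq (A : List (List Int)) (hpre : A ≠ []) :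
    ehTriangular A = ehTriangular_alt A := by
  simp only [ehTriangular, ehTriangular_alt]
  by_cases hany : (A.any fun row => row.length ≠ A.length) = false
  · have hq : pyEhQuadrada A = true := (sq_iff A hpre).mpr hany
    have hsq : ∀ row ∈ A, row.length = A.length := by
      simpa [List.any_eq_false] using hany
    rw [if_pos hq, if_neg (by simp; exact hsq)]
    have hp := peel_iff A true true
    have e1 : ((PySem.List.pyRange 1 (A.length : Int) 1).foldl (fun b1 i =>
        (PySem.List.pyRange 0 i 1).foldl (fun b j =>
          if PySem.List.pyGetD (PySem.List.pyGetD A i []) j 0 ≠ 0 then false else b) b1) true)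
        = (peel A true true).1 := by
      rw [Bool.eq_iff_iff, b1_iff A hsq, hp.1]
      tauto
    have e2 : ((PySem.List.pyRange 0 ((A.length : Int) - 1) 1).foldl (fun b2 i =>
        (PySem.List.pyRange (i + 1) (A.length : Int) 1).foldl (fun b j =>
          if PySem.List.pyGetD (PySem.List.pyGetD A i []) j 0 ≠ 0 then false else b) b2) true)
        = (peel A true true).2 := by
      rw [Bool.eq_iff_iff, b2_iff A hsq, hp.2]
      tauto
    rw [e1, e2]
  · have hq : pyEhQuadrada A ≠ true := fun hc => hany ((sq_iff A hpre).mp hc)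
    have hany' : (A.any fun row => row.length ≠ A.length) = true := by
      revert hany; cases (A.any fun row => row.length ≠ A.length) <;> simp
    rw [if_neg hq, if_pos hany']

-- ===== VERDICT (by name: the statement is the Claim_ definition above) =====
theorem ehTriangular_spec : Claim_equal_ehTriangular :=
  fun A _ hpre => main_eq A hpre
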